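-- pv_equiv track=rewrite | github.com/jesusvilela/connection_laplacian_lean | findings/round6/stage2_fuzzer_A/sheaf_gamma/fuzz.py | beta_balance_count
-- ===== SOURCE A (Python) =====
-- def beta_balance_count(n: int, edges, adj, W: int) -> int:
--     """Count number of connected components of (V,E) that are balanced under
--     the restriction of W to their edge set."""
--     color = [None] * n
--     cnt = 0
--     for s in range(n):
--         if color[s] is not None:
--             continue
--         color[s] = 0
--         stack = [s]
--         ok = True
--         while stack:
--             u = stack.pop()
--             for (w, e) in adj[u]:
--                 flip = (W >> e) & 1
--                 want = color[u] ^ flip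
--                 if color[w] is None:
--                     color[w] = want
--                     stack.append(w)
--                 elif color[w] != want:
--                     ok = False
--         if ok:
--             cnt += 1
--     return cnt
-- ===== SOURCE B (Python) =====
-- def beta_balance_count(n: int, edges, adj, W: int) -> int:
--     """Count number of connected components of (V,E) that are balanced under
--     the restriction of W to their edge set."""
--     color = [None] * n
--
--     def visit(u, ok):
--         news = []
--         for (w, e) in adj[u]:
--             want = color[u] ^ ((W >> e) & 1)
--             if color[w] is None:
--                 color[w] = want
--                 news.append(w)
--             elif color[w] != want:
--                 ok = False
--         for w in reversed(news):
--             ok = visit(w, ok)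
--         return ok
--
--     cnt = 0
--     for s in range(n):
--         if color[s] is None:
--             color[s] = 0
--             if visit(s, True):
--                 cnt += 1
--     return cnt
-- ===== Notes on version B (the rewrite author's own statement) =====
-- stated objective: alternative
-- what changed: A's explicit-stack iterative DFS with a mutable ok flag is replaced by a recursive DFS: visit(u) first colors all fresh neighbours of u, then recurses on them in reverse discovery order (exactly the order A's LIFO stack pops them), threading ok as a value.
-- outside the precondition, e.g. on beta_balance_count(1, [], [[(-1, 0)], [(5, 0)]], 0): A returns 1, B returns 1
import Mathlib
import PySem

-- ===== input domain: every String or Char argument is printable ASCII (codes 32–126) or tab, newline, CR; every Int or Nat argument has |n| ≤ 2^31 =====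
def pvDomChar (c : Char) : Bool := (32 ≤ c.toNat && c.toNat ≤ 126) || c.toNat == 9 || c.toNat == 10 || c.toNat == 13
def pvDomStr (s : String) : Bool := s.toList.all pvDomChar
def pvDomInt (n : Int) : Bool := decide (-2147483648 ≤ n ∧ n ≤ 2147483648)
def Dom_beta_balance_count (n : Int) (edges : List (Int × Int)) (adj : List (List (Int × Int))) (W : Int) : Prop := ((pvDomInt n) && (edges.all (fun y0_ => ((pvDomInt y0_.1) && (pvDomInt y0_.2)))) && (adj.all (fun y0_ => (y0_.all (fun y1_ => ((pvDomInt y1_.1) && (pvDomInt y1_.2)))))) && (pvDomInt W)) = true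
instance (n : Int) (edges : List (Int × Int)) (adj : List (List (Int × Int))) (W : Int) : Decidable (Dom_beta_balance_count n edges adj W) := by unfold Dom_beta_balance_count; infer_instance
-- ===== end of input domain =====

-- B replaces A's explicit-stack DFS 2-coloring with a recursive DFS (children are
-- explored by recursion, in reverse order of discovery, which is exactly the order
-- A's LIFO stack pops them); same return value, no speed claim.

-- number of still-uncolored cells ('None' entries); used as the termination measure
-- of both ports' traversals
def pvNN (c : List (Option Int)) : Nat := c.countP (fun o => o.isNone)

-- ===== PORT A =====  (Source A: outer loop over seeds; explicit stack, while stack: pop u,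
-- scan adj[u] left to right, coloring unvisited neighbours and pushing them)

-- one inner-for-loop step of A's while body: state is (stack, color, ok)
def pvStepA (W cu : Int) (acc : List Int × List (Option Int) × Bool) (we : Int × Int) :
    List Int × List (Option Int) × Bool :=
  let flip := PySem.Int.band (W >>> we.2.toNat) 1
  let want := PySem.Int.bxor cu flip
  match PySem.List.pyGet? acc.2.1 we.1 with
  | some none => (we.1 :: acc.1, PySem.List.pySetD acc.2.1 we.1 (some want), acc.2.2)
  | some (some c) => if c = want then acc else (acc.1, acc.2.1, false)
  | none => acc   -- Python raises IndexError here; outside Pre_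

-- A's 'for (w, e) in adj[u]' loop
def pvScanA (W cu : Int) (row : List (Int × Int)) (acc : List Int × List (Option Int) × Bool) :
    List Int × List (Option Int) × Bool :=
  row.foldl (pvStepA W cu) acc

-- A's while-body for one popped u
def pvPopA (adj : List (List (Int × Int))) (W u : Int)
    (acc : List Int × List (Option Int) × Bool) : List Int × List (Option Int) × Bool :=
  pvScanA W (((PySem.List.pyGet? acc.2.1 u).getD (some 0)).getD 0)
    ((PySem.List.pyGet? adj u).getD []) acc

-- cells are only ever colored (never uncolored): a scan step can push at most one
-- vertex and then colors it, so stack length + 2·(uncolored) never increases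
theorem pvGetSet (cs : List (Option Int)) (i : Int) (a : Option Int)
    (h : PySem.List.pyGet? cs i = some a) :
    ∃ k : Nat, cs[k]? = some a ∧ ∀ v : Option Int, PySem.List.pySetD cs i v = cs.set k v := by
  unfold PySem.List.pyGet? at h
  cases hk : PySem.List.pyIdx? cs.length i with
  | none => rw [hk] at h; simp at h
  | some k =>
    rw [hk] at h; simp at h
    exact ⟨k, h, by intro v; simp [PySem.List.pySetD, PySem.List.pySet?, hk]⟩

theorem pvNN_set_nat : ∀ (cs : List (Option Int)) (k : Nat) (v : Int),
    cs[k]? = some none → pvNN (cs.set k (some v)) + 1 = pvNN cs := by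
  intro cs
  induction cs with
  | nil => intro k v h; simp at h
  | cons a t ih =>
    intro k v h
    cases k with
    | zero => simp at h; subst h; simp [pvNN, List.countP_cons]
    | succ k =>
      simp at h
      have := ih k v h
      simp [pvNN, List.countP_cons] at this ⊢
      omega

theorem pvNN_set (c : List (Option Int)) (i : Int) (v : Int)
    (h : PySem.List.pyGet? c i = some none) :
    pvNN (PySem.List.pySetD c i (some v)) + 1 = pvNN c := by
  obtain ⟨k, hk, hs⟩ := pvGetSet c i none h
  rw [hs]; exact pvNN_set_nat c k v hk

theorem pvStepA_meas (W cu : Int) (acc : List Int × List (Option Int) × Bool) (we : Int × Int) :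
    (pvStepA W cu acc we).1.length + 2 * pvNN (pvStepA W cu acc we).2.1 ≤
      acc.1.length + 2 * pvNN acc.2.1 := by
  unfold pvStepA
  cases h : PySem.List.pyGet? acc.2.1 we.1 with
  | none => simp
  | some o =>
    cases o with
    | none =>
      have := pvNN_set acc.2.1 we.1
        (PySem.Int.bxor cu (PySem.Int.band (W >>> we.2.toNat) 1)) h
      simp only [List.length_cons]
      omega
    | some c => by_cases hc : c = PySem.Int.bxor cu (PySem.Int.band (W >>> we.2.toNat) 1) <;>
        simp [hc]

theorem pvScanA_meas (W cu : Int) :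
    ∀ (row : List (Int × Int)) (acc : List Int × List (Option Int) × Bool),
    (pvScanA W cu row acc).1.length + 2 * pvNN (pvScanA W cu row acc).2.1 ≤
      acc.1.length + 2 * pvNN acc.2.1 := by
  intro row
  unfold pvScanA
  induction row with
  | nil => intro acc; simp
  | cons we row ih =>
    intro acc
    rw [List.foldl_cons]
    have h1 := pvStepA_meas W cu acc we
    have h2 := ih (pvStepA W cu acc we)
    omega

theorem pvPopA_meas (adj : List (List (Int × Int))) (W u : Int)
    (acc : List Int × List (Option Int) × Bool) :
    (pvPopA adj W u acc).1.length + 2 * pvNN (pvPopA adj W u acc).2.1 ≤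
      acc.1.length + 2 * pvNN acc.2.1 := pvScanA_meas _ _ _ _

-- A's 'while stack:' loop
def pvLoopA (adj : List (List (Int × Int))) (W : Int)
    (σ : List Int × List (Option Int) × Bool) : List (Option Int) × Bool :=
  match σ with
  | ([], c, ok) => (c, ok)
  | (u :: st, c, ok) => pvLoopA adj W (pvPopA adj W u (st, c, ok))
termination_by σ.1.length + 2 * pvNN σ.2.1
decreasing_by
  have h := pvPopA_meas adj W u (st, c, ok)
  dsimp only at h
  simp only [List.length_cons]
  omega

-- A's 'for s in range(n):' body
def pvSeedStepA (adj : List (List (Int × Int))) (W : Int)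
    (acc : List (Option Int) × Int) (s : Int) : List (Option Int) × Int :=
  match PySem.List.pyGet? acc.1 s with
  | some none =>
      let r := pvLoopA adj W ([s], PySem.List.pySetD acc.1 s (some 0), true)
      (r.1, acc.2 + (if r.2 then 1 else 0))
  | _ => acc

def beta_balance_count (n : Int) (edges : List (Int × Int)) (adj : List (List (Int × Int))) (W : Int) : Int :=
  ((PySem.List.pyRange 0 n 1).foldl (pvSeedStepA adj W) (List.replicate n.toNat none, 0)).2

-- ===== PORT B =====  (Source B: recursive DFS: visit(u) scans adj[u] coloring fresh
-- neighbours into 'news', then recurses on reversed(news); fuel = n bounds the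
-- recursion depth, which Python's call stack carries implicitly)

-- Source B's 'for (w, e) in adj[u]' loop: state is (news, color, ok)
def pvScanB (W cu : Int) : List (Int × Int) → List Int × List (Option Int) × Bool →
    List Int × List (Option Int) × Bool
  | [], acc => acc
  | we :: row, acc =>
      let want := PySem.Int.bxor cu (PySem.Int.band (W >>> we.2.toNat) 1)
      match PySem.List.pyGet? acc.2.1 we.1 with
      | some none =>
          pvScanB W cu row
            (acc.1 ++ [we.1], PySem.List.pySetD acc.2.1 we.1 (some want), acc.2.2)
      | some (some c) =>
          pvScanB W cu row (if c = want then acc else (acc.1, acc.2.1, false))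
      | none => pvScanB W cu row acc   -- Python raises IndexError here; outside Pre_

-- Source B's visit(u, ok): returns the updated (color, ok)
def pvVisitB (adj : List (List (Int × Int))) (W : Int) :
    Nat → Int → List (Option Int) × Bool → List (Option Int) × Bool
  | 0, _, st => st
  | Nat.succ fuel, u, st =>
      let r := pvScanB W (((PySem.List.pyGet? st.1 u).getD (some 0)).getD 0)
        ((PySem.List.pyGet? adj u).getD []) ([], st.1, st.2)
      r.1.reverse.foldl (fun st' w => pvVisitB adj W fuel w st') r.2

-- Source B's 'for s in range(n):' loop
def pvSeedsB (adj : List (List (Int × Int))) (W : Int) :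
    List Int → List (Option Int) × Int → List (Option Int) × Int
  | [], acc => acc
  | s :: ss, acc =>
      pvSeedsB adj W ss
        (match PySem.List.pyGet? acc.1 s with
         | some none =>
             let r := pvVisitB adj W acc.1.length s
               (PySem.List.pySetD acc.1 s (some 0), true)
             (r.1, acc.2 + (if r.2 then 1 else 0))
         | _ => acc)

def beta_balance_count_alt (n : Int) (edges : List (Int × Int)) (adj : List (List (Int × Int))) (W : Int) : Int :=
  (pvSeedsB adj W (PySem.List.pyRange 0 n 1) (List.replicate n.toNat none, 0)).2

-- ===== PRECONDITION & SPEC =====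
-- Pre_ admits exactly the well-formed inputs on which every index and shift the
-- traversal performs is in range, so A raises nowhere inside Pre_ (on other inputs A
-- raises IndexError or ValueError); it also excludes negative vertex entries when
-- len(adj) ≠ n, where Python's from-the-right indexing of adj reads rows outside
-- range(n) that the 0..n-1 vertex encoding never defines.
def Pre_beta_balance_count (n : Int) (edges : List (Int × Int)) (adj : List (List (Int × Int))) (W : Int) : Prop :=
  0 < n → ((n ≤ (adj.length : Int)) ∧
    ∀ row ∈ adj.take n.toNat, ∀ we ∈ row,
      we.1 < n ∧ 0 ≤ we.2 ∧ (0 ≤ we.1 ∨ (-n ≤ we.1 ∧ (adj.length : Int) = n)))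
instance (n : Int) (edges : List (Int × Int)) (adj : List (List (Int × Int))) (W : Int) : Decidable (Pre_beta_balance_count n edges adj W) := by unfold Pre_beta_balance_count; infer_instance

def pvWitness_beta_balance_count : Int × (List (Int × Int)) × (List (List (Int × Int))) × Int :=
  (2, [(0, 1)], [[(1, 0)], [(0, 0)]], 1)

def Spec_beta_balance_count (n : Int) (edges : List (Int × Int)) (adj : List (List (Int × Int))) (W : Int) (out : Int) : Prop := out = beta_balance_count_alt n edges adj W
instance (n : Int) (edges : List (Int × Int)) (adj : List (List (Int × Int))) (W : Int) (out : Int) : Decidable (Spec_beta_balance_count n edges adj W out) := by unfold Spec_beta_balance_count; infer_instance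

-- ===== CLAIM (what is proved, stated in full; the proofs are below) =====
def Claim_equal_beta_balance_count : Prop := ∀ (n : Int) (edges : List (Int × Int)) (adj : List (List (Int × Int))) (W : Int), Dom_beta_balance_count n edges adj W → Pre_beta_balance_count n edges adj W → Spec_beta_balance_count n edges adj W (beta_balance_count n edges adj W)

-- ===== LEMMAS AND PROOFS =====

theorem pvLoopA_nil (adj : List (List (Int × Int))) (W : Int)
    (st : List (Option Int) × Bool) : pvLoopA adj W ([], st) = st := by
  cases st; simp [pvLoopA]

-- B's scan only appends to 'news': peel the accumulator off
theorem pvScanB_append (W cu : Int) :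
    ∀ (row : List (Int × Int)) (ns : List Int) (c : List (Option Int)) (ok : Bool),
    pvScanB W cu row (ns, c, ok) =
      (ns ++ (pvScanB W cu row ([], c, ok)).1, (pvScanB W cu row ([], c, ok)).2) := by
  intro row
  induction row with
  | nil => intro ns c ok; simp [pvScanB]
  | cons we row ih =>
    intro ns c ok
    cases hg : PySem.List.pyGet? c we.1 with
    | none => simp only [pvScanB, hg]; exact ih ns c ok
    | some o =>
      cases o with
      | none =>
        simp only [pvScanB, hg, List.nil_append]
        rw [ih (ns ++ [we.1]), ih [we.1]]
        simp
      | some x =>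
        by_cases hx : x = PySem.Int.bxor cu (PySem.Int.band (W >>> we.2.toNat) 1)
        · simp only [pvScanB, hg, hx, if_true]
          exact ih ns c ok
        · simp only [pvScanB, hg, if_neg hx]
          exact ih ns c false

-- A's scan is B's scan with the fresh vertices pushed (reversed) onto the stack
theorem pvScanAB (W cu : Int) :
    ∀ (row : List (Int × Int)) (st : List Int) (c : List (Option Int)) (ok : Bool),
    pvScanA W cu row (st, c, ok) =
      ((pvScanB W cu row ([], c, ok)).1.reverse ++ st, (pvScanB W cu row ([], c, ok)).2) := by
  intro row
  induction row with
  | nil => intro st c ok; simp [pvScanA, pvScanB]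
  | cons we row ih =>
    intro st c ok
    cases hg : PySem.List.pyGet? c we.1 with
    | none =>
      simp only [pvScanA, List.foldl_cons, pvStepA, pvScanB, hg]
      exact ih st c ok
    | some o =>
      cases o with
      | none =>
        simp only [pvScanA, List.foldl_cons, pvStepA, pvScanB, hg, List.nil_append]
        rw [show (List.foldl (pvStepA W cu)
            (we.1 :: st, PySem.List.pySetD c we.1
              (some (PySem.Int.bxor cu (PySem.Int.band (W >>> we.2.toNat) 1))), ok) row) =
            pvScanA W cu row (we.1 :: st, PySem.List.pySetD c we.1
              (some (PySem.Int.bxor cu (PySem.Int.band (W >>> we.2.toNat) 1))), ok) from rfl]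
        rw [ih, pvScanB_append W cu row [we.1]]
        simp
      | some x =>
        by_cases hx : x = PySem.Int.bxor cu (PySem.Int.band (W >>> we.2.toNat) 1)
        · simp only [pvScanA, List.foldl_cons, pvStepA, pvScanB, hg, hx, if_true]
          exact ih st c ok
        · simp only [pvScanA, List.foldl_cons, pvStepA, pvScanB, hg, if_neg hx]
          exact ih st c false

-- B's scan colors exactly one fresh cell per appended vertex
theorem pvScanB_nn (W cu : Int) :
    ∀ (row : List (Int × Int)) (ns : List Int) (c : List (Option Int)) (ok : Bool),
    pvNN (pvScanB W cu row (ns, c, ok)).2.1 + (pvScanB W cu row (ns, c, ok)).1.length =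
      pvNN c + ns.length := by
  intro row
  induction row with
  | nil => intro ns c ok; simp [pvScanB]
  | cons we row ih =>
    intro ns c ok
    cases hg : PySem.List.pyGet? c we.1 with
    | none => simp only [pvScanB, hg]; exact ih ns c ok
    | some o =>
      cases o with
      | none =>
        simp only [pvScanB, hg, List.nil_append]
        have h1 := pvNN_set c we.1
          (PySem.Int.bxor cu (PySem.Int.band (W >>> we.2.toNat) 1)) hg
        have h2 := ih (ns ++ [we.1])
          (PySem.List.pySetD c we.1
            (some (PySem.Int.bxor cu (PySem.Int.band (W >>> we.2.toNat) 1)))) ok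
        simp only [List.length_append, List.length_cons, List.length_nil] at h2 ⊢
        omega
      | some x =>
        by_cases hx : x = PySem.Int.bxor cu (PySem.Int.band (W >>> we.2.toNat) 1)
        · simp only [pvScanB, hg, hx, if_true]
          exact ih ns c ok
        · simp only [pvScanB, hg, if_neg hx]
          exact ih ns c false

theorem pvVisitB_nn (adj : List (List (Int × Int))) (W : Int) :
    ∀ (f : Nat) (u : Int) (st : List (Option Int) × Bool),
    pvNN (pvVisitB adj W f u st).1 ≤ pvNN st.1 := by
  intro f
  induction f with
  | zero => intro u st; simp [pvVisitB]
  | succ f ih =>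
    intro u st
    have hfold : ∀ (l : List Int) (st' : List (Option Int) × Bool),
        pvNN (l.foldl (fun s w => pvVisitB adj W f w s) st').1 ≤ pvNN st'.1 := by
      intro l
      induction l with
      | nil => intro st'; simp
      | cons w l ihl => intro st'; exact le_trans (ihl _) (ih w st')
    simp only [pvVisitB]
    refine le_trans (hfold _ _) ?_
    have h := pvScanB_nn W (((PySem.List.pyGet? st.1 u).getD (some 0)).getD 0)
      ((PySem.List.pyGet? adj u).getD []) [] st.1 st.2
    simp only [List.length_nil] at h
    omega

-- fuel does not matter as long as it exceeds the number of uncolored cells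
theorem pvVisitB_fuel (adj : List (List (Int × Int))) (W : Int) :
    ∀ (f g : Nat) (u : Int) (st : List (Option Int) × Bool),
    pvNN st.1 < f → pvNN st.1 < g → pvVisitB adj W f u st = pvVisitB adj W g u st := by
  intro f
  induction f with
  | zero => intro g u st hf; exact absurd hf (Nat.not_lt_zero _)
  | succ f ih =>
    intro g u st hf hg
    cases g with
    | zero => omega
    | succ g =>
      simp only [pvVisitB]
      have h := pvScanB_nn W (((PySem.List.pyGet? st.1 u).getD (some 0)).getD 0)
        ((PySem.List.pyGet? adj u).getD []) [] st.1 st.2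
      simp only [List.length_nil] at h
      set r := pvScanB W (((PySem.List.pyGet? st.1 u).getD (some 0)).getD 0)
        ((PySem.List.pyGet? adj u).getD []) ([], st.1, st.2) with hr
      by_cases hnil : r.1 = []
      · simp [hnil]
      · have hlen : 1 ≤ r.1.length := by
          cases hc : r.1 with
          | nil => exact absurd hc hnil
          | cons a l => simp [hc]
        have hlt : pvNN r.2.1 < f ∧ pvNN r.2.1 < g := by omega
        have hfold : ∀ (l : List Int) (st' : List (Option Int) × Bool),
            pvNN st'.1 < f → pvNN st'.1 < g →
            l.foldl (fun s w => pvVisitB adj W f w s) st' =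
              l.foldl (fun s w => pvVisitB adj W g w s) st' := by
          intro l
          induction l with
          | nil => intro st' _ _; rfl
          | cons w l ihl =>
            intro st' h1 h2
            simp only [List.foldl_cons]
            rw [ih g w st' h1 h2]
            exact ihl _ (lt_of_le_of_lt (pvVisitB_nn adj W g w st') h1)
              (lt_of_le_of_lt (pvVisitB_nn adj W g w st') h2)
        exact hfold r.1.reverse r.2 hlt.1 hlt.2

-- canonical-fuel visit, used to state the simulation
def pvBv (adj : List (List (Int × Int))) (W : Int)
    (st : List (Option Int) × Bool) (w : Int) : List (Option Int) × Bool :=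
  pvVisitB adj W (pvNN st.1 + 1) w st

theorem pvFoldFuel (adj : List (List (Int × Int))) (W : Int) :
    ∀ (l : List Int) (st : List (Option Int) × Bool) (F : Nat), pvNN st.1 < F →
    l.foldl (fun s w => pvVisitB adj W F w s) st = l.foldl (pvBv adj W) st := by
  intro l
  induction l with
  | nil => intro st F h; rfl
  | cons w l ih =>
    intro st F h
    simp only [List.foldl_cons]
    rw [show pvVisitB adj W F w st = pvBv adj W st w from
      pvVisitB_fuel adj W F (pvNN st.1 + 1) w st h (Nat.lt_succ_self _)]
    exact ih _ F (lt_of_le_of_lt (pvVisitB_nn adj W _ w st) h)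

-- the simulation: running A's stack machine on xs ++ rest is running B's recursive
-- visit over xs, then the machine on rest
theorem pvSim (adj : List (List (Int × Int))) (W : Int) :
    ∀ (k : Nat) (xs : List Int) (c : List (Option Int)) (ok : Bool) (rest : List Int),
    pvNN c + xs.length ≤ k →
    pvLoopA adj W (xs ++ rest, c, ok) =
      pvLoopA adj W (rest, xs.foldl (pvBv adj W) (c, ok)) := by
  intro k
  induction k with
  | zero =>
    intro xs c ok rest h
    cases xs with
    | nil => simp
    | cons u xs' => simp at h
  | succ k ih =>
    intro xs c ok rest h
    cases xs with
    | nil => simp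
    | cons u xs' =>
      have e1 : pvLoopA adj W ((u :: xs') ++ rest, c, ok) =
          pvLoopA adj W (pvPopA adj W u (xs' ++ rest, c, ok)) := by
        rw [List.cons_append, pvLoopA]
      have e2 : pvPopA adj W u (xs' ++ rest, c, ok) =
          ((pvScanB W (((PySem.List.pyGet? c u).getD (some 0)).getD 0)
              ((PySem.List.pyGet? adj u).getD []) ([], c, ok)).1.reverse ++ (xs' ++ rest),
           (pvScanB W (((PySem.List.pyGet? c u).getD (some 0)).getD 0)
              ((PySem.List.pyGet? adj u).getD []) ([], c, ok)).2) := by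
        unfold pvPopA
        exact pvScanAB W _ _ _ _ _
      set Y := pvScanB W (((PySem.List.pyGet? c u).getD (some 0)).getD 0)
        ((PySem.List.pyGet? adj u).getD []) ([], c, ok) with hY
      have hnn := pvScanB_nn W (((PySem.List.pyGet? c u).getD (some 0)).getD 0)
        ((PySem.List.pyGet? adj u).getD []) [] c ok
      simp only [List.length_nil, ← hY] at hnn
      have hk : pvNN Y.2.1 + (Y.1.reverse ++ xs').length ≤ k := by
        simp only [List.length_append, List.length_reverse]
        simp only [List.length_cons] at h
        omega
      have e3 := ih (Y.1.reverse ++ xs') Y.2.1 Y.2.2 rest hk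
      have e5 : pvBv adj W (c, ok) u = Y.1.reverse.foldl (pvBv adj W) Y.2 := by
        unfold pvBv
        simp only [pvVisitB, ← hY]
        by_cases hnil : Y.1 = []
        · simp [hnil]
        · have hlen : 1 ≤ Y.1.length := by
            cases hc : Y.1 with
            | nil => exact absurd hc hnil
            | cons a l => simp [hc]
          have hlt : pvNN Y.2.1 < pvNN c := by omega
          exact pvFoldFuel adj W Y.1.reverse Y.2 (pvNN c) hlt
      rw [e1, e2, ← List.append_assoc]
      rw [show ((Y.1.reverse ++ xs') ++ rest, Y.2) =
        ((Y.1.reverse ++ xs') ++ rest, Y.2.1, Y.2.2) from rfl]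
      rw [e3, List.foldl_append]
      rw [show (Y.2.1, Y.2.2) = Y.2 from rfl, ← e5]
      rfl

theorem pvSeedsEq (adj : List (List (Int × Int))) (W : Int) :
    ∀ (l : List Int) (acc : List (Option Int) × Int),
    pvSeedsB adj W l acc = l.foldl (pvSeedStepA adj W) acc := by
  intro l
  induction l with
  | nil => intro acc; simp [pvSeedsB]
  | cons s ss ih =>
    intro acc
    rw [List.foldl_cons, pvSeedsB]
    cases hg : PySem.List.pyGet? acc.1 s with
    | none => simp only [pvSeedStepA, hg]; exact ih acc
    | some o =>
      cases o with
      | some x => simp only [pvSeedStepA, hg]; exact ih acc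
      | none =>
        have hlt : pvNN (PySem.List.pySetD acc.1 s (some 0)) < acc.1.length := by
          have h1 := pvNN_set acc.1 s 0 hg
          have h2 : pvNN acc.1 ≤ acc.1.length := List.countP_le_length
          omega
        have hA : pvLoopA adj W ([s], PySem.List.pySetD acc.1 s (some 0), true) =
            pvVisitB adj W (pvNN (PySem.List.pySetD acc.1 s (some 0)) + 1) s
              (PySem.List.pySetD acc.1 s (some 0), true) := by
          have hs := pvSim adj W (pvNN (PySem.List.pySetD acc.1 s (some 0)) + 1) [s]
            (PySem.List.pySetD acc.1 s (some 0)) true [] (by simp)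
          simp only [List.append_nil] at hs
          rw [hs, pvLoopA_nil]
          simp [pvBv]
        have hfu := pvVisitB_fuel adj W
          (pvNN (PySem.List.pySetD acc.1 s (some 0)) + 1) acc.1.length s
          (PySem.List.pySetD acc.1 s (some 0), true)
          (Nat.lt_succ_self _) hlt
        simp only [pvSeedStepA, hg]
        rw [hA, hfu]
        exact ih _

-- ===== VERDICT (by name: the statement is the Claim_ definition above) =====
theorem beta_balance_count_spec : Claim_equal_beta_balance_count := by
  intro n edges adj W _ _
  unfold Spec_beta_balance_count beta_balance_count beta_balance_count_alt
  rw [pvSeedsEq]
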